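-- pv_equiv track=rewrite | github.com/yeezy-na-izi/school | cc/rod_ss.py | from_big_to_small
-- ===== SOURCE A (Python) =====
-- def from_big_to_small(n, p, k):
--     outp = ''
--     for i in n:
--         st = ''
--         if i.isdigit():
--             b = int(i)
--         else:
--             b = ord(i) - 55
--         while b:
--             ost = b % p
--             st = str(ost) + st
--             b //= p
--         outp += '0' * (k - len(st)) + st
--     return outp.lstrip("0")
-- ===== SOURCE B (Python) =====
-- def from_big_to_small(n, p, k):
--     parts = []
--     for ch in n:
--         b = int(ch) if ch.isdigit() else ord(ch) - 55
--         m = 0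
--         while p ** m <= b:
--             m += 1
--         s = ''.join(str((b // p ** j) % p) for j in range(m - 1, -1, -1))
--         parts.append('0' * (k - len(s)) + s)
--     return ''.join(parts).lstrip('0')
-- ===== Notes on version B (the rewrite author's own statement) =====
-- stated objective: alternative
-- what changed: Each character's base-p digit string is produced MSB-first by positional extraction ((b // p**j) % p for j = m-1..0, with the digit count m found by a separate search loop) and the chunks collected in a list joined once, instead of A's LSB-first repeated-division loop that prepends str(b % p) to an accumulator string.
-- outside the precondition, e.g. on from_big_to_small('Z5', -2, 3): A returns '-10-1-10-1-1-1-1-1', B returns '-100-1-1-1-1-1'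
import Mathlib
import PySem

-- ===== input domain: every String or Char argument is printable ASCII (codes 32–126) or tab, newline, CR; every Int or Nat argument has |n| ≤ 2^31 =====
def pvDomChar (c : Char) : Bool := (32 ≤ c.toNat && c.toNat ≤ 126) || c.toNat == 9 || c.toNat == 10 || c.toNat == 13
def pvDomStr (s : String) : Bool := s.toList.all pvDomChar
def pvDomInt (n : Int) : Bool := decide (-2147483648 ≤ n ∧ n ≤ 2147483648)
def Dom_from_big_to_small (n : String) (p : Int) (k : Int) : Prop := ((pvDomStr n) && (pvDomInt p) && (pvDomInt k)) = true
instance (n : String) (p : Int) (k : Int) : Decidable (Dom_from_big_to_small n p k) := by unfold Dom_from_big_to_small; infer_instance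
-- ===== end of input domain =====

-- B re-implements the per-character base conversion MSB-first by positional extraction
-- ((b // p**j) % p for j = m-1..0, m found by a digit-count search) instead of A's
-- LSB-first repeated-division string prepend; objective: alternative decomposition.

-- ===== PORT A =====
-- b = int(i) if i.isdigit() else ord(i) - 55   (the identical expression occurs in Source A and
-- Source B; int(i) on a single digit char always parses, so the .getD 0 default is unreachable)
def pvCharVal (c : Char) : Int :=
  if PySem.Chars.isdigit c then (PySem.Int.ofStr? (String.mk [c])).getD 0
  else (c.toNat : Int) - 55

-- while b: ost = b % p; st = str(ost) + st; b //= p   — fuel b.natAbs + 1 suffices on every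
-- input Pre_ admits (p ≥ 2, b ≥ 0: the loop runs digit-count-of-b ≤ b times)
def pvALoop : Nat → Int → Int → List Char → List Char
  | 0, _, _, st => st
  | fuel + 1, b, p, st =>
    if b = 0 then st
    else pvALoop fuel (PySem.Int.floordiv b p) p (PySem.Int.toChars (PySem.Int.mod b p) ++ st)

def from_big_to_small (n : String) (p : Int) (k : Int) : String :=
  String.mk ((n.toList.foldl (fun outp c =>
    let b := pvCharVal c
    let st := pvALoop (b.natAbs + 1) b p []
    -- outp += '0' * (k - len(st)) + st   ('0'*m is '' for m ≤ 0: .toNat clamps exactly so)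
    outp ++ (List.replicate (k - (st.length : Int)).toNat '0' ++ st)) []
  -- .lstrip("0") = drop leading '0' characters (exact)
  ).dropWhile (· == '0'))

-- ===== PORT B =====
-- m = 0; while p ** m <= b: m += 1   — same fuel bound as A's loop
def pvMLoop : Nat → Int → Int → Nat → Nat
  | 0, _, _, m => m
  | fuel + 1, p, b, m => if p ^ m ≤ b then pvMLoop fuel p b (m + 1) else m

def from_big_to_small_alt (n : String) (p : Int) (k : Int) : String :=
  String.mk ((PySem.Chars.join [] (n.toList.foldl (fun parts c =>
    let b := pvCharVal c
    let m := pvMLoop (b.natAbs + 1) p b 0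
    -- s = ''.join(str((b // p ** j) % p) for j in range(m - 1, -1, -1))
    -- (every j the range yields is ≥ 0, so p ** j is p ^ j.toNat exactly)
    let s := PySem.Chars.join []
      ((PySem.List.pyRange ((m : Int) - 1) (-1) (-1)).map
        (fun j => PySem.Int.toChars (PySem.Int.mod (PySem.Int.floordiv b (p ^ j.toNat)) p)))
    parts ++ [List.replicate (k - (s.length : Int)).toNat '0' ++ s]) [])
  ).dropWhile (· == '0'))

-- ===== PRECONDITION & SPEC =====
-- Pre_ excludes: p ≤ 1 on strings with a character of nonzero value (A diverges, or raises
-- ZeroDivisionError at p = 0); non-digit characters below code 55 when p ≥ 2 (their value b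
-- is negative and A's division loop never reaches 0: A diverges); and negative bases p ≤ -2
-- (A returns, but the result carries embedded '-' signs from str(negative digit) — not a
-- base-p numeral; both behaviours are defensible accidents and that corner is excluded).
def Pre_from_big_to_small (n : String) (p : Int) (k : Int) : Prop :=
  (2 ≤ p ∧ n.toList.all (fun c => PySem.Chars.isdigit c || decide (55 ≤ c.toNat)) = true) ∨
  n.toList.all (· == '0') = true
instance (n : String) (p : Int) (k : Int) : Decidable (Pre_from_big_to_small n p k) := by
  unfold Pre_from_big_to_small; infer_instance

def pvWitness_from_big_to_small : String × Int × Int := ("Z5", 2, 3)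

def Spec_from_big_to_small (n : String) (p : Int) (k : Int) (out : String) : Prop :=
  out = from_big_to_small_alt n p k
instance (n : String) (p : Int) (k : Int) (out : String) : Decidable (Spec_from_big_to_small n p k out) := by
  unfold Spec_from_big_to_small; infer_instance

-- ===== CLAIM (what is proved, stated in full; the proofs are below) =====
def Claim_equal_from_big_to_small : Prop := ∀ (n : String) (p : Int) (k : Int), Dom_from_big_to_small n p k → Pre_from_big_to_small n p k → Spec_from_big_to_small n p k (from_big_to_small n p k)

-- ===== LEMMAS AND PROOFS =====

-- canonical digit string of b in base q2+2, MSB first (the value A's while loop builds)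
def pvDigs (q2 : Nat) (b : Nat) : List Char :=
  if h : b = 0 then []
  else pvDigs q2 (b / (q2 + 2)) ++ PySem.Int.toChars ((b % (q2 + 2) : Nat) : Int)
  decreasing_by exact Nat.div_lt_self (Nat.pos_of_ne_zero h) (by omega)

-- digit count of b in base q2+2
def pvMc (q2 : Nat) (b : Nat) : Nat :=
  if h : b = 0 then 0 else pvMc q2 (b / (q2 + 2)) + 1
  decreasing_by exact Nat.div_lt_self (Nat.pos_of_ne_zero h) (by omega)

lemma pvMc_le (q2 b : Nat) : pvMc q2 b ≤ b := by
  induction b using Nat.strong_induction_on with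
  | _ b ih =>
    rw [pvMc]
    split
    · omega
    · rename_i h
      have hlt : b / (q2 + 2) < b := Nat.div_lt_self (Nat.pos_of_ne_zero h) (by omega)
      have := ih _ hlt
      omega

lemma pvJoinNil (ls : List (List Char)) : PySem.Chars.join [] ls = ls.flatten := by
  induction ls with
  | nil => simp [PySem.Chars.join_nil]
  | cons x rest ih =>
    cases rest with
    | nil => simp [PySem.Chars.join, List.intercalate]
    | cons y r => rw [PySem.Chars.join_cons_cons]; simp_all

lemma pvALoop_eq (q2 : Nat) : ∀ (fuel b : Nat) (st : List Char), b < fuel →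
    pvALoop fuel (b : Int) ((q2 + 2 : Nat) : Int) st = pvDigs q2 b ++ st := by
  intro fuel
  induction fuel with
  | zero => intro b st h; omega
  | succ f ih =>
    intro b st h
    by_cases hb : b = 0
    · subst hb; rw [pvDigs]; simp [pvALoop]
    · have hbz : ¬ ((b : Int) = 0) := by exact_mod_cast hb
      have hlt : b / (q2 + 2) < b := Nat.div_lt_self (Nat.pos_of_ne_zero hb) (by omega)
      rw [pvALoop, if_neg hbz, PySem.Int.floordiv_natCast, PySem.Int.mod_natCast,
        ih _ _ (by omega)]
      conv_rhs => rw [pvDigs, dif_neg hb]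
      rw [List.append_assoc]

lemma pvMLoop_eq (q2 b : Nat) : ∀ (fuel m0 : Nat), pvMc q2 (b / (q2 + 2) ^ m0) < fuel →
    pvMLoop fuel ((q2 + 2 : Nat) : Int) (b : Int) m0 = m0 + pvMc q2 (b / (q2 + 2) ^ m0) := by
  intro fuel
  induction fuel with
  | zero => intro m0 h; omega
  | succ f ih =>
    intro m0 h
    rw [pvMLoop]
    by_cases hle : ((q2 + 2 : Nat) : Int) ^ m0 ≤ (b : Int)
    · have hq : (q2 + 2) ^ m0 ≤ b := by exact_mod_cast hle
      have hpos : 1 ≤ b / (q2 + 2) ^ m0 :=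
        (Nat.one_le_div_iff (by positivity)).2 hq
      have hne : b / (q2 + 2) ^ m0 ≠ 0 := by omega
      have hstep : b / (q2 + 2) ^ (m0 + 1) = (b / (q2 + 2) ^ m0) / (q2 + 2) := by
        rw [Nat.div_div_eq_div_mul, pow_succ]
      have hmc : pvMc q2 (b / (q2 + 2) ^ m0) = pvMc q2 (b / (q2 + 2) ^ (m0 + 1)) + 1 := by
        rw [pvMc, dif_neg hne, hstep]
      rw [if_pos hle, ih (m0 + 1) (by omega), hmc]
      omega
    · have hq : ¬ ((q2 + 2) ^ m0 ≤ b) := by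
        intro hab
        exact hle (by exact_mod_cast hab)
      have hz : b / (q2 + 2) ^ m0 = 0 := Nat.div_eq_of_lt (by omega)
      rw [if_neg hle, hz, pvMc]
      simp

-- the MSB-first positional digit string equals the canonical digit string
lemma pvChunk_eq (q2 : Nat) (b : Nat) :
    (((List.range (pvMc q2 b)).reverse).map
      (fun i => PySem.Int.toChars ((b / (q2 + 2) ^ i % (q2 + 2) : Nat) : Int))).flatten
      = pvDigs q2 b := by
  induction b using Nat.strong_induction_on with
  | _ b ih =>
    by_cases hb : b = 0
    · subst hb; rw [pvMc, pvDigs]; simp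
    · have hlt : b / (q2 + 2) < b := Nat.div_lt_self (Nat.pos_of_ne_zero hb) (by omega)
      have hmc : pvMc q2 b = pvMc q2 (b / (q2 + 2)) + 1 := by rw [pvMc, dif_neg hb]
      rw [hmc, List.range_succ_eq_map, List.reverse_cons, List.map_append,
        List.flatten_append, List.map_reverse, List.map_map]
      have hmap : ((List.range (pvMc q2 (b / (q2 + 2)))).map
            ((fun i => PySem.Int.toChars ((b / (q2 + 2) ^ i % (q2 + 2) : Nat) : Int)) ∘ Nat.succ))
          = (List.range (pvMc q2 (b / (q2 + 2)))).map
            (fun i => PySem.Int.toChars ((b / (q2 + 2) / (q2 + 2) ^ i % (q2 + 2) : Nat) : Int)) := by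
        apply List.map_congr_left
        intro i _
        have hdd : b / (q2 + 2) ^ (Nat.succ i) = b / (q2 + 2) / (q2 + 2) ^ i := by
          rw [Nat.div_div_eq_div_mul, ← pow_succ']
        simp [Function.comp, hdd]
      rw [hmap, ← List.map_reverse, ih _ hlt]
      conv_rhs => rw [pvDigs, dif_neg hb]
      simp

-- A's chunk equals B's chunk, p ≥ 2, character value ≥ 0
lemma pvStEq (p : Int) (hp : 2 ≤ p) (b : Int) (hb : 0 ≤ b) :
    pvALoop (b.natAbs + 1) b p [] =
      PySem.Chars.join []
        ((PySem.List.pyRange ((pvMLoop (b.natAbs + 1) p b 0 : Int) - 1) (-1) (-1)).map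
          (fun j => PySem.Int.toChars (PySem.Int.mod (PySem.Int.floordiv b (p ^ j.toNat)) p))) := by
  obtain ⟨q2, rfl⟩ : ∃ q2 : Nat, p = ((q2 + 2 : Nat) : Int) :=
    ⟨(p - 2).toNat, by push_cast; omega⟩
  obtain ⟨bn, rfl⟩ : ∃ bn : Nat, b = (bn : Int) := ⟨b.toNat, (Int.toNat_of_nonneg hb).symm⟩
  rw [Int.natAbs_natCast]
  rw [pvALoop_eq q2 (bn + 1) bn [] (Nat.lt_succ_self bn), List.append_nil]
  have hfuel : pvMc q2 (bn / (q2 + 2) ^ 0) < bn + 1 := by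
    rw [pow_zero, Nat.div_one]
    exact Nat.lt_succ_of_le (pvMc_le q2 bn)
  rw [pvMLoop_eq q2 bn (bn + 1) 0 hfuel]
  simp only [pow_zero, Nat.div_one, Nat.zero_add]
  rw [PySem.List.pyRange_neg_one_eq_reverse]
  have h1 : (-1 : Int) + 1 = 0 := by norm_num
  have h2 : ((pvMc q2 bn : Int) - 1) + 1 = ((pvMc q2 bn : Nat) : Int) := by ring
  rw [h1, h2, PySem.List.pyRange_zero_natCast, List.map_reverse, List.map_map]
  have hmap : ((List.range (pvMc q2 bn)).map
        ((fun j : Int => PySem.Int.toChars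
            (PySem.Int.mod (PySem.Int.floordiv (bn : Int) (((q2 + 2 : Nat) : Int) ^ j.toNat)) ((q2 + 2 : Nat) : Int)))
          ∘ (fun k : Nat => (k : Int))))
      = (List.range (pvMc q2 bn)).map
          (fun i => PySem.Int.toChars ((bn / (q2 + 2) ^ i % (q2 + 2) : Nat) : Int)) := by
    apply List.map_congr_left
    intro i _
    simp only [Function.comp_apply, Int.toNat_natCast]
    rw [← Nat.cast_pow, PySem.Int.floordiv_natCast, PySem.Int.mod_natCast]
  rw [hmap, pvJoinNil, ← List.map_reverse, pvChunk_eq]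

-- A's chunk equals B's chunk at value 0, any p (the all-'0' disjunct of Pre_)
lemma pvStEq_zero (p : Int) :
    pvALoop ((0 : Int).natAbs + 1) (0 : Int) p [] =
      PySem.Chars.join []
        ((PySem.List.pyRange ((pvMLoop ((0 : Int).natAbs + 1) p (0 : Int) 0 : Int) - 1) (-1) (-1)).map
          (fun j => PySem.Int.toChars (PySem.Int.mod (PySem.Int.floordiv (0 : Int) (p ^ j.toNat)) p))) := by
  have hm : pvMLoop ((0 : Int).natAbs + 1) p (0 : Int) 0 = 0 := by
    simp [pvMLoop]
  rw [hm]
  have hr : ((0 : Nat) : Int) - 1 = -1 := by norm_num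
  rw [hr, PySem.List.pyRange_neg_one_eq_nil (le_refl (-1 : Int))]
  simp [pvALoop, PySem.Chars.join_nil]

lemma pvCharVal_nonneg (c : Char) (h : PySem.Chars.isdigit c = true ∨ 55 ≤ c.toNat) :
    0 ≤ pvCharVal c := by
  by_cases hd : PySem.Chars.isdigit c = true
  · have hb : 48 ≤ c.toNat ∧ c.toNat ≤ 57 := by
      simp only [PySem.Chars.isdigit, Bool.and_eq_true, decide_eq_true_eq] at hd
      obtain ⟨h1, h2⟩ := hd
      rw [Char.le_def] at h1 h2
      exact ⟨h1, h2⟩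
    obtain ⟨h1, h2⟩ := hb
    interval_cases hh : c.toNat <;> (rw [← Char.ofNat_toNat c, hh]; decide)
  · have h55 : 55 ≤ c.toNat := h.resolve_left hd
    unfold pvCharVal
    rw [if_neg hd]
    omega

lemma pvFoldsEq (l : List Char) (cA cB : Char → List Char) (h : ∀ c ∈ l, cA c = cB c) :
    l.foldl (fun acc c => acc ++ cA c) [] = (l.foldl (fun ps c => ps ++ [cB c]) []).flatten := by
  have haux : ∀ (l' : List Char), (∀ c ∈ l', cA c = cB c) →
      ∀ (accA : List Char) (accB : List (List Char)), accA = accB.flatten →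
      l'.foldl (fun acc c => acc ++ cA c) accA = (l'.foldl (fun ps c => ps ++ [cB c]) accB).flatten := by
    intro l'
    induction l' with
    | nil => intro _ accA accB hacc; simpa using hacc
    | cons x xs ih =>
      intro hall accA accB hacc
      simp only [List.foldl_cons]
      refine ih (fun c hc => hall c (List.mem_cons_of_mem _ hc)) _ _ ?_
      simp [hacc, hall x (by simp)]
  exact haux l h [] [] rfl

-- ===== VERDICT (by name: the statement is the Claim_ definition above) =====
theorem from_big_to_small_spec : Claim_equal_from_big_to_small := by
  intro n p k hdom hpre
  unfold Spec_from_big_to_small from_big_to_small from_big_to_small_alt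
  dsimp only
  rw [pvJoinNil]
  congr 1
  congr 1
  apply pvFoldsEq
  intro c hc
  rcases hpre with ⟨hp, hchars⟩ | hz
  · have hcv := List.all_eq_true.1 hchars c hc
    rw [Bool.or_eq_true, decide_eq_true_eq] at hcv
    rw [pvStEq p hp (pvCharVal c) (pvCharVal_nonneg c hcv)]
  · have h0 : c = '0' := by simpa using List.all_eq_true.1 hz c hc
    subst h0
    have hv : pvCharVal '0' = 0 := by decide
    rw [hv, pvStEq_zero p]
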